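-- pv_equiv track=rewrite | github.com/kingamal/TicTacToe | main.py | column_winner
-- ===== SOURCE A (Python) =====
-- def winning_line(strings):
--     piece = strings[0]
--     if piece == ' ':
--         return False
--     for entry in strings:
--         if piece != entry:
--             return False
--     return True
--
-- def column_winner(board):
--     for col in range(len(board[0])):
--         column = []
--         for row in board:
--             column.append(row[col])
--         if winning_line(column):
--             return True
--     return False
-- ===== SOURCE B (Python) =====
-- def column_winner(board):
--     top = board[0]
--     alive = [cell != ' ' for cell in top]
--     for row in board[1:]:
--         alive = [a and (x == t) for a, x, t in zip(alive, row, top)]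
--     return any(alive)
-- ===== Notes on version B (the rewrite author's own statement) =====
-- stated objective: alternative
-- what changed: Replaces A's column-major loop that materializes each column and re-scans it with a single row-major candidate-elimination pass over a boolean 'alive' vector zipped against the first row.
-- outside the precondition, e.g. on column_winner([['x', 'y'], ['x']]): A returns True, B returns True
import Mathlib
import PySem

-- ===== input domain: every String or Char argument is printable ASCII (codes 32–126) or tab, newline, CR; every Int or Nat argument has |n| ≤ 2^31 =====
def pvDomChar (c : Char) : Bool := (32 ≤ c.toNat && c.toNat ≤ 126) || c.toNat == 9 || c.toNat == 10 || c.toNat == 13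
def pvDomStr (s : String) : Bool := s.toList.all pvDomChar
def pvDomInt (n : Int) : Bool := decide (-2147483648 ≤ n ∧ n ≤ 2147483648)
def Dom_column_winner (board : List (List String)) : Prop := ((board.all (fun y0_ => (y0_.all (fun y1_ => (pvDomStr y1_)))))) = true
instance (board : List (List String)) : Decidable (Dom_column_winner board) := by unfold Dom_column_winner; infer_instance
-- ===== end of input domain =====

-- ===== PORT A =====
-- B changes the decomposition: row-major candidate elimination instead of A's column-major
-- column materialization; objective 'alternative' (same asymptotic cost). Equivalence is
-- claimed on Pre_ (nonempty, non-ragged boards).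

-- port of winning_line; strings[0] is headD "" (strings is nonempty at every call under Pre_)
def winning_line (strings : List String) : Bool :=
  let piece := strings.headD ""
  if piece = " " then false
  else strings.all (fun entry => piece == entry)

-- row[col] is getD: exact under Pre_, where every index col < row.length
def column_winner (board : List (List String)) : Bool :=
  (List.range (board.headD []).length).any (fun col =>
    winning_line (board.map (fun row => row.getD col "")))

-- ===== PORT B =====
-- port of Python's 3-ary zip (truncates to the shortest list), used by Source B
def pyZip3 {α β γ : Type} : List α → List β → List γ → List (α × β × γ)
  | a :: as, b :: bs, c :: cs => (a, b, c) :: pyZip3 as bs cs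
  | _, _, _ => []

def column_winner_alt (board : List (List String)) : Bool :=
  match board with
  | [] => false  -- Python raises IndexError on board[0]; excluded by Pre_
  | top :: rest =>
    let alive0 := top.map (fun cell => decide (cell ≠ " "))
    let alive := rest.foldl
      (fun alive row => (pyZip3 alive row top).map (fun p => p.1 && decide (p.2.1 = p.2.2)))
      alive0
    alive.any id

-- ===== PRECONDITION & SPEC =====
-- Pre_ excludes the empty board, on which A raises IndexError, and ragged boards (a row
-- shorter than the first), on which A raises IndexError unless an earlier column already
-- wins -- in that accidental early-return case A returns True and B agrees (see cite).
def Pre_column_winner (board : List (List String)) : Prop :=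
  board ≠ [] ∧ ∀ row ∈ board, (board.headD []).length ≤ row.length
instance (board : List (List String)) : Decidable (Pre_column_winner board) := by
  unfold Pre_column_winner; infer_instance
def pvWitness_column_winner : List (List String) := [["x", "o"], ["x", "x"]]
def Spec_column_winner (board : List (List String)) (out : Bool) : Prop := out = column_winner_alt board
instance (board : List (List String)) (out : Bool) : Decidable (Spec_column_winner board out) := by unfold Spec_column_winner; infer_instance

-- ===== CLAIM (what is proved, stated in full; the proofs are below) =====
def Claim_equal_column_winner : Prop := ∀ (board : List (List String)), Dom_column_winner board → Pre_column_winner board → Spec_column_winner board (column_winner board)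

-- ===== LEMMAS AND PROOFS =====

theorem pyZip3_length {α β γ : Type} (as : List α) (bs : List β) (cs : List γ) :
    (pyZip3 as bs cs).length = min as.length (min bs.length cs.length) := by
  induction as generalizing bs cs with
  | nil => simp [pyZip3]
  | cons a as ih =>
    cases bs with
    | nil => simp [pyZip3]
    | cons b bs =>
      cases cs with
      | nil => simp [pyZip3]
      | cons c cs => simp [pyZip3, ih]

theorem pyZip3_getElem {α β γ : Type} (as : List α) (bs : List β) (cs : List γ)
    (i : ℕ) (h : i < (pyZip3 as bs cs).length)
    (ha : i < as.length) (hb : i < bs.length) (hc : i < cs.length) :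
    (pyZip3 as bs cs)[i] = (as[i], bs[i], cs[i]) := by
  induction as generalizing bs cs i with
  | nil => simp at ha
  | cons a as ih =>
    cases bs with
    | nil => simp at hb
    | cons b bs =>
      cases cs with
      | nil => simp at hc
      | cons c cs =>
        cases i with
        | zero => simp [pyZip3]
        | succ i =>
          simp only [pyZip3, List.getElem_cons_succ]
          exact ih bs cs i _ (by simpa using ha) (by simpa using hb) (by simpa using hc)

theorem beq_eq_decide_str (x y : String) : (x == y) = decide (x = y) := by
  by_cases h : x = y <;> simp [h]

theorem beq_comm_str (x y : String) : (x == y) = (y == x) := by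
  rw [beq_eq_decide_str, beq_eq_decide_str]
  simp [eq_comm]

-- one elimination step of B, characterized elementwise
theorem step_char (top row : List String) (alive : List Bool)
    (hlen : alive.length = top.length) (hrow : top.length ≤ row.length) :
    ((pyZip3 alive row top).map (fun p => p.1 && decide (p.2.1 = p.2.2))).length = top.length ∧
    ∀ (c : ℕ) (hc : c < top.length),
      ((pyZip3 alive row top).map (fun p => p.1 && decide (p.2.1 = p.2.2)))[c]? =
        some (alive[c]'(by omega) && (row.getD c "" == top.getD c "")) := by
  have hL : ((pyZip3 alive row top).map (fun p => p.1 && decide (p.2.1 = p.2.2))).length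
      = top.length := by
    simp only [List.length_map, pyZip3_length]; omega
  refine ⟨hL, ?_⟩
  intro c hc
  have hz := pyZip3_getElem alive row top c
    (by simp only [pyZip3_length]; omega) (by omega) (by omega) hc
  rw [List.getElem?_eq_getElem (by omega), List.getElem_map, hz,
    List.getD_eq_getElem row "" (by omega : c < row.length), List.getD_eq_getElem top "" hc,
    beq_eq_decide_str]

-- the whole elimination fold of B, characterized elementwise
theorem fold_char (top : List String) (rest : List (List String)) :
    ∀ (alive : List Bool) (hlen : alive.length = top.length)
      (_hrows : ∀ row ∈ rest, top.length ≤ row.length),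
    (rest.foldl
      (fun alive row => (pyZip3 alive row top).map (fun p => p.1 && decide (p.2.1 = p.2.2)))
      alive).length = top.length ∧
    ∀ (c : ℕ) (hc : c < top.length),
      (rest.foldl
        (fun alive row => (pyZip3 alive row top).map (fun p => p.1 && decide (p.2.1 = p.2.2)))
        alive)[c]? =
        some (alive[c]'(by omega) && rest.all (fun row => row.getD c "" == top.getD c "")) := by
  induction rest with
  | nil =>
    intro alive hlen _
    refine ⟨hlen, ?_⟩
    intro c hc
    rw [List.foldl_nil, List.getElem?_eq_getElem (by omega)]
    simp
  | cons row rest ih =>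
    intro alive hlen hrows
    have hrow : top.length ≤ row.length := hrows row (by simp)
    obtain ⟨slen, selem⟩ := step_char top row alive hlen hrow
    obtain ⟨flen, felem⟩ := ih _ slen (fun r hr => hrows r (by simp [hr]))
    refine ⟨by simpa using flen, ?_⟩
    intro c hc
    have hstep := selem c hc
    have hfold := felem c hc
    rw [List.foldl_cons, hfold]
    have hsome : ((pyZip3 alive row top).map (fun p => p.1 && decide (p.2.1 = p.2.2)))[c]'(by omega)
        = (alive[c]'(by omega) && (row.getD c "" == top.getD c "")) := by
      have := List.getElem?_eq_getElem
        (l := (pyZip3 alive row top).map (fun p => p.1 && decide (p.2.1 = p.2.2)))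
        (i := c) (by omega)
      rw [this] at hstep
      exact Option.some.inj hstep
    rw [hsome]
    simp [Bool.and_assoc]

-- A's per-column test, in closed form
theorem winning_line_col (top : List String) (rest : List (List String)) (c : ℕ) :
    winning_line ((top :: rest).map (fun row => row.getD c "")) =
      (decide (top.getD c "" ≠ " ") &&
        rest.all (fun row => row.getD c "" == top.getD c "")) := by
  simp only [winning_line, List.map_cons, List.headD_cons, List.all_cons]
  generalize top.getD c "" = t
  by_cases h : t = " "
  · simp [h]
  · rw [if_neg h]
    simp only [ne_eq, h, not_false_eq_true, decide_true, Bool.true_and, beq_self_eq_true,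
      List.all_map, Function.comp_def]
    congr 1
    funext row
    exact beq_comm_str t (row.getD c "")

-- ===== VERDICT (by name: the statement is the Claim_ definition above) =====
theorem column_winner_spec : Claim_equal_column_winner := by
  intro board _ hpre
  obtain ⟨hne, hrows⟩ := hpre
  unfold Spec_column_winner
  cases board with
  | nil => exact absurd rfl hne
  | cons top rest =>
    have hrows' : ∀ row ∈ rest, top.length ≤ row.length := by
      intro r hr; simpa using hrows r (by simp [hr])
    simp only [column_winner, column_winner_alt, List.headD_cons]
    obtain ⟨flen, felem⟩ := fold_char top rest (top.map fun cell => decide (cell ≠ " "))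
      (by simp) hrows'
    rw [Bool.eq_iff_iff]
    simp only [List.any_eq_true, List.mem_range, id_eq]
    constructor
    · rintro ⟨c, hc, hwin⟩
      rw [winning_line_col] at hwin
      have h := felem c hc
      rw [List.getElem_map, decide_not] at h
      refine ⟨true, ?_, rfl⟩
      refine List.mem_of_getElem? (i := c) ?_
      rw [h]
      congr 1
      simpa [List.getElem?_eq_getElem hc, decide_not] using hwin
    · rintro ⟨b, hb, rfl⟩
      obtain ⟨c, hc, hcb⟩ := List.mem_iff_getElem.mp hb
      rw [flen] at hc
      refine ⟨c, hc, ?_⟩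
      rw [winning_line_col]
      have h := felem c hc
      rw [List.getElem?_eq_getElem (by omega), hcb] at h
      rw [List.getElem_map, decide_not] at h
      have := Option.some.inj h
      simpa [List.getElem?_eq_getElem hc, decide_not] using this.symm
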